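-- pv_equiv track=rewrite | github.com/DeveloperAcademy-POSTECH/Algorithm | TEAM B2 (Season 2)/Week 2/Ollie/[스택큐_기능개발].py | solution
-- ===== SOURCE A (Python) =====
-- from typing import List
-- import math
--
-- def solution(progresses: List[int], speeds: List[int]) -> List[int]:
--     if not progresses: return []
--     workingDayStack = workingDayList(progresses, speeds)[::-1]
--     result: List[int] = []
--     tempWorkingDay = workingDayStack.pop()
--     tempCount = 1
--     while workingDayStack:
--         currentWorkingDay = workingDayStack.pop()
--         if tempWorkingDay < currentWorkingDay:
--             result.append(tempCount)
--             tempWorkingDay = currentWorkingDay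
--             tempCount = 1
--         else:
--             tempCount += 1
--     result.append(tempCount)
--     return result
--
-- def workingDayList(progresses: List[int], speeds: List[int]) -> List[int]:
--     return [ math.ceil((100-progress)/speed) for (progress, speed) in zip(progresses, speeds)]
-- ===== SOURCE B (Python) =====
-- from typing import List
-- import math
--
--
-- def solution(progresses: List[int], speeds: List[int]) -> List[int]:
--     days = [math.ceil((100 - p) / s) for p, s in zip(progresses, speeds)]
--     n = len(days)
--     result: List[int] = []
--     i = 0
--     while i < n:
--         j = i + 1
--         while j < n and days[j] <= days[i]:
--             j += 1
--         result.append(j - i)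
--         i = j
--     return result
-- ===== Notes on version B (the rewrite author's own statement) =====
-- stated objective: alternative
-- what changed: Replaced A's reversed-stack pop loop that carries (batch-front, running-count) state by a two-pointer scan over the days table: for each batch start i an inner scan advances j to the first index with days[j] > days[i], the batch size is emitted as the index difference j - i, and i jumps to j.
import Mathlib
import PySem

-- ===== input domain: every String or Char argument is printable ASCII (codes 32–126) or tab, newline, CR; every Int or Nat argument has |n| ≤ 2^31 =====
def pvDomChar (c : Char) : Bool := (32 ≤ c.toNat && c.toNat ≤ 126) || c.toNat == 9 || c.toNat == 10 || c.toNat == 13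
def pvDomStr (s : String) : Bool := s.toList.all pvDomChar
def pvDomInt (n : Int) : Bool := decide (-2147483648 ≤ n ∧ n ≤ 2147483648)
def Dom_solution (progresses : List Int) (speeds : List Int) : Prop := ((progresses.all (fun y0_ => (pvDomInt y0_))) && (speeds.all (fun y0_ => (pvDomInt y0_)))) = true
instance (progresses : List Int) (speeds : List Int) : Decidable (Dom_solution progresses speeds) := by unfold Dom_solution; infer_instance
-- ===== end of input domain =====

-- B replaces A's reversed-stack pop loop carrying (batch-front, running-count) state by a
-- two-pointer scan over the days table, emitting each batch size as an index difference.

-- ===== PORT A =====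
-- math.ceil((100-p)/s) : exact integer ceiling -((-(100-p)) // s); on Dom (|ints| ≤ 2^31)
-- the float division's rounding error is below the distance to the nearest integer, so
-- float ceil equals the exact rational ceiling.
def workingDayList (progresses : List Int) (speeds : List Int) : List Int :=
  (progresses.zip speeds).map (fun pr => -(PySem.Int.floordiv (-(100 - pr.1)) pr.2))

def solutionLoop (stack : List Int) (tempWorkingDay : Int) (tempCount : Int) (result : List Int) : List Int :=
  match h : PySem.List.pop? stack (-1) with
  | none => result ++ [tempCount]
  | some (currentWorkingDay, rest) =>
    if tempWorkingDay < currentWorkingDay then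
      solutionLoop rest currentWorkingDay 1 (result ++ [tempCount])
    else
      solutionLoop rest tempWorkingDay (tempCount + 1) result
termination_by stack.length
decreasing_by all_goals (have h2 : rest.length + 1 = stack.length := PySem.List.length_of_pop?_eq_some stack h; omega)

def solution (progresses : List Int) (speeds : List Int) : List Int :=
  if progresses = [] then []
  else
    match PySem.List.pop? ((workingDayList progresses speeds).reverse) (-1) with
    | none => []   -- Python raises IndexError here; excluded by Pre_solution
    | some (tempWorkingDay, stack) => solutionLoop stack tempWorkingDay 1 []

-- ===== PORT B =====
-- inner while loop: advance j while j < n and days[j] <= days[i]; indices are always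
-- in range and nonnegative, so days.getD j 0 is exactly Python's days[j] here.
def scanJ (days : List Int) (di : Int) (j : Nat) : Nat :=
  if _h : j < days.length then
    if days.getD j 0 ≤ di then scanJ days di (j + 1) else j
  else j
termination_by days.length - j
decreasing_by omega

-- needed by `outerLoop`'s termination proof (the inner scan never moves j backwards)
theorem scanJ_le (days : List Int) (di : Int) (j : Nat) : j ≤ scanJ days di j := by
  fun_induction scanJ days di j <;> omega

-- outer while loop with the result accumulator
def outerLoop (days : List Int) (i : Nat) (result : List Int) : List Int :=
  if _h : i < days.length then
    outerLoop days (scanJ days (days.getD i 0) (i + 1))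
      (result ++ [((scanJ days (days.getD i 0) (i + 1) : Int) - (i : Int))])
  else result
termination_by days.length - i
decreasing_by have := scanJ_le days (days.getD i 0) (i + 1); omega

def solution_alt (progresses : List Int) (speeds : List Int) : List Int :=
  let days := (progresses.zip speeds).map (fun pr => -(PySem.Int.floordiv (-(100 - pr.1)) pr.2))
  outerLoop days 0 []

-- ===== PRECONDITION & SPEC =====
-- Pre_ excludes exactly the inputs where Python A raises: a zero speed among the zipped
-- pairs (ZeroDivisionError) and a nonempty progresses with empty speeds (pop from empty).
def Pre_solution (progresses : List Int) (speeds : List Int) : Prop :=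
  progresses = [] ∨ (speeds ≠ [] ∧ ∀ pr ∈ progresses.zip speeds, pr.2 ≠ 0)
instance (progresses : List Int) (speeds : List Int) : Decidable (Pre_solution progresses speeds) := by unfold Pre_solution; infer_instance

def pvWitness_solution : List Int × List Int := ([93, 30, 55], [1, 30, 5])

def Spec_solution (progresses : List Int) (speeds : List Int) (out : List Int) : Prop := out = solution_alt progresses speeds
instance (progresses : List Int) (speeds : List Int) (out : List Int) : Decidable (Spec_solution progresses speeds out) := by unfold Spec_solution; infer_instance

-- ===== CLAIM (what is proved, stated in full; the proofs are below) =====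
def Claim_equal_solution : Prop := ∀ (progresses : List Int) (speeds : List Int), Dom_solution progresses speeds → Pre_solution progresses speeds → Spec_solution progresses speeds (solution progresses speeds)

-- ===== LEMMAS AND PROOFS =====

-- A's loop over the reversed stack (temp, cnt at position j) equals B's two-pointer loop:
-- the next batch boundary is scanJ, and cnt + (scanJ - j) is the completed batch's size.
theorem loop_eq_outer (days : List Int) (k : Nat) :
    ∀ (j : Nat) (temp cnt : Int) (res : List Int), days.length - j = k → j ≤ days.length →
    solutionLoop ((days.drop j).reverse) temp cnt res
      = outerLoop days (scanJ days temp j) (res ++ [cnt + ((scanJ days temp j : Int) - (j : Int))]) := by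
  induction k with
  | zero =>
    intro j temp cnt res hk hj
    have hj' : j = days.length := by omega
    subst hj'
    rw [List.drop_length, List.reverse_nil, solutionLoop]
    split
    · rw [scanJ]
      simp [outerLoop]
    · rename_i h; simp [PySem.List.pop?] at h
  | succ k ih =>
    intro j temp cnt res hk hj
    have hjn : j < days.length := by omega
    have hd : days.drop j = days.getD j 0 :: days.drop (j + 1) := by
      rw [List.getD_eq_getElem days 0 hjn]
      exact (List.getElem_cons_drop hjn).symm
    rw [hd, List.reverse_cons, solutionLoop, PySem.List.pop?_last]
    show (if temp < days.getD j 0 then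
            solutionLoop ((days.drop (j + 1)).reverse) (days.getD j 0) 1 (res ++ [cnt])
          else solutionLoop ((days.drop (j + 1)).reverse) temp (cnt + 1) res)
        = outerLoop days (scanJ days temp j) (res ++ [cnt + ((scanJ days temp j : Int) - (j : Int))])
    by_cases hc : temp < days.getD j 0
    · -- new batch starts at j
      have hs : scanJ days temp j = j := by
        rw [scanJ, dif_pos hjn, if_neg (by omega : ¬ days.getD j 0 ≤ temp)]
      rw [if_pos hc, ih (j + 1) (days.getD j 0) 1 (res ++ [cnt]) (by omega) (by omega), hs]
      conv_rhs => rw [outerLoop]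
      rw [dif_pos hjn]
      congr 1
      simp only [List.append_assoc, List.singleton_append, List.cons.injEq, List.append_cancel_left_eq]
      refine ⟨by ring_nf, by push_cast; ring_nf, trivial⟩
    · -- still inside the current batch
      have hs : scanJ days temp j = scanJ days temp (j + 1) := by
        rw [scanJ, dif_pos hjn, if_pos (by omega : days.getD j 0 ≤ temp)]
      rw [if_neg hc, ih (j + 1) temp (cnt + 1) res (by omega) (by omega), hs]
      congr 2
      push_cast
      ring_nf

theorem solution_eq (progresses speeds : List Int) (hpre : Pre_solution progresses speeds) :
    solution progresses speeds = solution_alt progresses speeds := by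
  by_cases hp : progresses = []
  · subst hp; simp [solution, solution_alt, outerLoop]
  · have hs : speeds ≠ [] := by
      rcases hpre with h | ⟨h, _⟩
      · exact absurd h hp
      · exact h
    obtain ⟨p, ps, rfl⟩ := List.exists_cons_of_ne_nil hp
    obtain ⟨s, ss, rfl⟩ := List.exists_cons_of_ne_nil hs
    unfold solution solution_alt workingDayList
    simp only [if_neg hp]
    set f : Int × Int → Int := fun pr => -(PySem.Int.floordiv (-(100 - pr.1)) pr.2) with hf
    set days : List Int := ((p :: ps).zip (s :: ss)).map f with hdays
    have hlen : 0 < days.length := by simp [hdays]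
    have hd0 : days = days.getD 0 0 :: days.drop 1 := by
      rw [List.getD_eq_getElem days 0 hlen]
      exact (List.getElem_cons_drop hlen).symm
    rw [hd0, List.reverse_cons, PySem.List.pop?_last]
    show solutionLoop ((days.drop 1).reverse) (days.getD 0 0) 1 [] = outerLoop days 0 []
    rw [loop_eq_outer days (days.length - 1) 1 (days.getD 0 0) 1 [] rfl (by omega)]
    conv_rhs => rw [outerLoop]
    rw [dif_pos hlen]
    congr 2
    push_cast
    ring_nf

-- ===== VERDICT (by name: the statement is the Claim_ definition above) =====
theorem solution_spec : Claim_equal_solution := by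
  intro progresses speeds _ hpre
  exact solution_eq progresses speeds hpre
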